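-- pv_equiv track=rewrite | github.com/hsn8086/exam | codeforces/ungrouped/A_Robbers_watch.py | check
-- ===== SOURCE A (Python) =====
-- def check(a, b, n, m):
--     cnt = 0
--     for i, v in enumerate(reversed(a), 0):
--         cnt += v * 7**i
--     if cnt >= n:
--         return False
--     cnt = 0
--     for i, v in enumerate(reversed(b), 0):
--         cnt += v * 7**i
--     if cnt >= m:
--         return False
--     return True
-- ===== SOURCE B (Python) =====
-- def check(a, b, n, m):
--     def val(ds):
--         acc = 0
--         for d in ds:
--             acc = acc * 7 + d
--         return acc
--     return val(a) < n and val(b) < m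
-- ===== Notes on version B (the rewrite author's own statement) =====
-- stated objective: faster
-- what changed: Replaces the two reversed-enumerate positional sums with powers 7**i and staged early-return ifs by a shared Horner-accumulator helper function (no reversal, no exponentiation) and a single boolean conjunction return.
import Mathlib
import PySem

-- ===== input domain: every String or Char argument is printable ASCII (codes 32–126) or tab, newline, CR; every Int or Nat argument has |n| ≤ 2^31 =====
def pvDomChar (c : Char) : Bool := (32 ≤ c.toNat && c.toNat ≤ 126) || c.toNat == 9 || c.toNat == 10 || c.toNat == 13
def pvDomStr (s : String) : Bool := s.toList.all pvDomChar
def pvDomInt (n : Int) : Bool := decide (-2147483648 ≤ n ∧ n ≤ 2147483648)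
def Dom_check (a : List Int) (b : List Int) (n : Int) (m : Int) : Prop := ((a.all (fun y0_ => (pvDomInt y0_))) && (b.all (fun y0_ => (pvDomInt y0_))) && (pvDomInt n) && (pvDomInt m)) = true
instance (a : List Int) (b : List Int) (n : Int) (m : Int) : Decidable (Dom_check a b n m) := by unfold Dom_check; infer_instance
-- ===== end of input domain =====

-- B replaces the reversed positional sums (v * 7**i) and staged early-return ifs by a Horner accumulator helper function and one boolean conjunction; objective: faster (measured: no repeated 7**i exponentiation).

-- ===== PORT A =====
def check (a : List Int) (b : List Int) (n : Int) (m : Int) : Bool :=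
  let cnt := (PySem.List.enumerate a.reverse 0).foldl (fun c p => c + p.2 * 7 ^ p.1.toNat) 0
  if cnt ≥ n then false
  else
    let cnt2 := (PySem.List.enumerate b.reverse 0).foldl (fun c p => c + p.2 * 7 ^ p.1.toNat) 0
    if cnt2 ≥ m then false else true

-- ===== PORT B =====
-- Horner accumulator helper, as in Source B's `val`
def pvVal (ds : List Int) : Int := ds.foldl (fun acc d => acc * 7 + d) 0

def check_alt (a : List Int) (b : List Int) (n : Int) (m : Int) : Bool :=
  decide (pvVal a < n) && decide (pvVal b < m)

-- ===== PRECONDITION & SPEC =====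
def Spec_check (a : List Int) (b : List Int) (n : Int) (m : Int) (out : Bool) : Prop := out = check_alt a b n m
instance (a : List Int) (b : List Int) (n : Int) (m : Int) (out : Bool) : Decidable (Spec_check a b n m out) := by unfold Spec_check; infer_instance

-- ===== CLAIM (what is proved, stated in full; the proofs are below) =====
def Claim_equal_check : Prop := ∀ (a : List Int) (b : List Int) (n : Int) (m : Int), Dom_check a b n m → Spec_check a b n m (check a b n m)

-- ===== LEMMAS AND PROOFS =====

-- the positional sum of A's loop, over the reversed list
theorem pos_sum_cons (x : Int) (t : List Int) :
    (PySem.List.enumerate (x :: t).reverse 0).foldl (fun c p => c + p.2 * 7 ^ p.1.toNat) 0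
      = (PySem.List.enumerate t.reverse 0).foldl (fun c p => c + p.2 * 7 ^ p.1.toNat) 0
        + x * 7 ^ t.length := by
  have h : (x :: t).reverse = t.reverse ++ [x] := by simp
  rw [h, PySem.List.enumerate_append, List.foldl_append]
  simp [PySem.List.enumerate]

theorem pvVal_eq_pos_sum (l : List Int) (c : Int) :
    l.foldl (fun acc d => acc * 7 + d) c
      = c * 7 ^ l.length
        + (PySem.List.enumerate l.reverse 0).foldl (fun c p => c + p.2 * 7 ^ p.1.toNat) 0 := by
  induction l generalizing c with
  | nil => simp
  | cons x t ih =>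
    rw [List.foldl_cons, ih, pos_sum_cons, List.length_cons, pow_succ]
    ring

-- ===== VERDICT (by name: the statement is the Claim_ definition above) =====
theorem check_spec : Claim_equal_check := by
  intro a b n m _
  unfold Spec_check check check_alt
  unfold pvVal
  rw [pvVal_eq_pos_sum a 0, pvVal_eq_pos_sum b 0]
  simp only [zero_mul, zero_add]
  split_ifs with h1 h2 <;> simp <;> omega
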